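-- pv_equiv track=rewrite | github.com/psharp1289/Humans-Adaptively-Deploy-Forward-and-Backward-Prediction | Study_5/data/tally_mistakes.py | count_consecutive_non_empty
-- ===== SOURCE A (Python) =====
-- def count_consecutive_non_empty(entries):
--     count = 0
--     max_count = 0
--
--     for entry in entries:
--         if entry:
--             count += 1
--             max_count = max(max_count, count)
--         else:
--             count = 0
--
--     return max_count
-- ===== SOURCE B (Python) =====
-- def count_consecutive_non_empty(entries):
--     # Two-pointer run scan: at each truthy position, advance a second index
--     # to the end of the run, record its length, and jump past the separator.
--     best = 0
--     i = 0
--     n = len(entries)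
--     while i < n:
--         if entries[i]:
--             j = i
--             while j < n and entries[j]:
--                 j += 1
--             if j - i > best:
--                 best = j - i
--             i = j + 1
--         else:
--             i += 1
--     return best
-- ===== Notes on version B (the rewrite author's own statement) =====
-- stated objective: alternative
-- what changed: Replaces the element-wise running-counter/running-max loop with a two-pointer scan that locates each maximal truthy run by index, records its length, and jumps past the separator.
import Mathlib
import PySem

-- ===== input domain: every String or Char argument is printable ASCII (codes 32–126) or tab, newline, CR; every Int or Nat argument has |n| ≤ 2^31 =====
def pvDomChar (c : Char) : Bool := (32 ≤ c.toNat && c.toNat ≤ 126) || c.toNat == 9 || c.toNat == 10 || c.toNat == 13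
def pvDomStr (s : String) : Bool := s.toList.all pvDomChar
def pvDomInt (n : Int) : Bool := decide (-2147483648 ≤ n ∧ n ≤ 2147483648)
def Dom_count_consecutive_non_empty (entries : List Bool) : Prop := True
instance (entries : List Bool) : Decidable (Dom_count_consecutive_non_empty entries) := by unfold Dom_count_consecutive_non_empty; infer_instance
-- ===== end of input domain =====

-- B replaces A's running-counter/running-max loop by a two-pointer maximal-run scan (alternative structure, same cost).


-- ===== PORT A =====
-- A's for-loop over `entries` with state (count, max_count), returning max_count.
def count_consecutive_non_empty (entries : List Bool) : Int :=
  (entries.foldl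
    (fun (s : Int × Int) entry =>
      if entry then (s.1 + 1, max s.2 (s.1 + 1)) else (0, s.2))
    (0, 0)).2

-- ===== PORT B =====
-- inner while loop: advance j to the first index (≥ j) that is out of range or falsy
def pvInner (entries : List Bool) (j : Nat) : Nat :=
  if h : j < entries.length then
    if entries[j] then pvInner entries (j + 1) else j
  else j
termination_by entries.length - j

-- termination fact for the outer loop: the inner scan never moves j backwards
lemma pvInner_ge (entries : List Bool) (j : Nat) : j ≤ pvInner entries j := by
  rw [pvInner]
  split
  · split
    · exact le_trans (Nat.le_succ j) (pvInner_ge entries (j + 1))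
    · exact le_rfl
  · exact le_rfl
termination_by entries.length - j

-- outer while loop: i and best
def pvOuter (entries : List Bool) (i best : Nat) : Nat :=
  if h : i < entries.length then
    if entries[i] then
      let j := pvInner entries i
      pvOuter entries (j + 1) (if best < j - i then j - i else best)
    else pvOuter entries (i + 1) best
  else best
termination_by entries.length - i
decreasing_by
  · have := pvInner_ge entries i; omega
  · omega

def count_consecutive_non_empty_alt (entries : List Bool) : Int :=
  (pvOuter entries 0 0 : Int)

-- ===== PRECONDITION & SPEC =====
def Spec_count_consecutive_non_empty (entries : List Bool) (out : Int) : Prop := out = count_consecutive_non_empty_alt entries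
instance (entries : List Bool) (out : Int) : Decidable (Spec_count_consecutive_non_empty entries out) := by unfold Spec_count_consecutive_non_empty; infer_instance

-- ===== CLAIM (what is proved, stated in full; the proofs are below) =====
def Claim_equal_count_consecutive_non_empty : Prop := ∀ (entries : List Bool), Dom_count_consecutive_non_empty entries → Spec_count_consecutive_non_empty entries (count_consecutive_non_empty entries)

-- ===== LEMMAS AND PROOFS =====

-- length of the leading truthy run (proof-only abstraction of the inner scan)
def pvPrefRun (l : List Bool) : Nat :=
  match l with
  | [] => 0
  | e :: t => if e then pvPrefRun t + 1 else 0

-- recursive run decomposition (proof-only intermediary between the two ports)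
def pvAltAux (l : List Bool) : Nat :=
  match l with
  | [] => 0
  | e :: t =>
    max (pvPrefRun (e :: t)) (pvAltAux ((e :: t).drop (pvPrefRun (e :: t) + 1)))
termination_by l.length
decreasing_by simp

lemma pvAltAux_nil : pvAltAux [] = 0 := by rw [pvAltAux.eq_def]

lemma pvAltAux_eq (l : List Bool) :
    pvAltAux l = max (pvPrefRun l) (pvAltAux (l.drop (pvPrefRun l + 1))) := by
  cases l with
  | nil => rw [pvAltAux.eq_def]; simp [pvPrefRun, pvAltAux_nil]
  | cons e t => rw [pvAltAux.eq_def]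

lemma pvPrefRun_cons (e : Bool) (t : List Bool) :
    pvPrefRun (e :: t) = if e then pvPrefRun t + 1 else 0 := rfl

lemma pvInner_eq (entries : List Bool) (j : Nat) :
    pvInner entries j = j + pvPrefRun (entries.drop j) := by
  rw [pvInner]
  split
  · rename_i h
    rw [List.drop_eq_getElem_cons h, pvPrefRun_cons]
    split
    · rename_i he
      rw [pvInner_eq entries (j + 1)]
      omega
    · omega
  · rename_i h
    rw [List.drop_eq_nil_of_le (by omega)]
    simp [pvPrefRun]
termination_by entries.length - j

lemma pvOuter_eq (entries : List Bool) (i best : Nat) :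
    pvOuter entries i best = max best (pvAltAux (entries.drop i)) := by
  rw [pvOuter]
  split
  · rename_i h
    have hdrop : entries.drop i = entries[i] :: entries.drop (i + 1) :=
      List.drop_eq_getElem_cons h
    split
    · rename_i he
      have hj : pvInner entries i = i + pvPrefRun (entries.drop i) := pvInner_eq entries i
      have hr1 : 1 ≤ pvPrefRun (entries.drop i) := by
        rw [hdrop, pvPrefRun_cons, if_pos he]; omega
      rw [pvOuter_eq entries (pvInner entries i + 1)]
      have hdd : entries.drop (pvInner entries i + 1)
          = (entries.drop i).drop (pvPrefRun (entries.drop i) + 1) := by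
        rw [List.drop_drop, hj]; ring_nf
      rw [hdd, pvAltAux_eq (entries.drop i), hj]
      have : i + pvPrefRun (entries.drop i) - i = pvPrefRun (entries.drop i) := by omega
      rw [this]
      split <;> omega
    · rename_i he
      rw [pvOuter_eq entries (i + 1)]
      rw [pvAltAux_eq (entries.drop i), hdrop, pvPrefRun_cons,
        if_neg (by simpa using he)]
      simp
  · rename_i h
    rw [List.drop_eq_nil_of_le (by omega), pvAltAux_nil]
    omega
termination_by entries.length - i
decreasing_by
  · have := pvInner_ge entries i; omega
  · omega

lemma pvFoldA (l : List Bool) :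
    ∀ (c m : Int), 0 ≤ c → c ≤ m →
      (l.foldl
        (fun (s : Int × Int) entry =>
          if entry then (s.1 + 1, max s.2 (s.1 + 1)) else (0, s.2))
        (c, m)).2
      = max m (max (c + (pvPrefRun l : Int)) (pvAltAux (l.drop (pvPrefRun l + 1)) : Int)) := by
  induction l with
  | nil => intro c m hc hcm; simp [pvPrefRun, pvAltAux_nil]; omega
  | cons e t ih =>
    intro c m hc hcm
    cases e with
    | true =>
      simp only [List.foldl_cons, if_true, pvPrefRun]
      rw [ih (c + 1) (max m (c + 1)) (by omega) (by omega)]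
      simp only [List.drop_succ_cons]
      push_cast
      omega
    | false =>
      simp only [List.foldl_cons, Bool.false_eq_true, if_false, pvPrefRun]
      rw [ih 0 m (by omega) (by omega)]
      simp only [List.drop_succ_cons, List.drop_zero, Nat.cast_zero, zero_add]
      rw [pvAltAux_eq t]
      push_cast
      omega

-- ===== VERDICT (by name: the statement is the Claim_ definition above) =====
theorem count_consecutive_non_empty_spec : Claim_equal_count_consecutive_non_empty := by
  intro entries _
  unfold Spec_count_consecutive_non_empty count_consecutive_non_empty count_consecutive_non_empty_alt
  rw [pvFoldA entries 0 0 le_rfl le_rfl, pvOuter_eq entries 0 0]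
  rw [List.drop_zero, pvAltAux_eq entries]
  push_cast
  omega
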